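-- pv_equiv track=rewrite | github.com/TencentBlueKing/blueking-dbm | dbm-ui/backend/db_periodic_task/local_tasks/redis_clusternodes_update/task.py | redis_cluster_nodes_group_by_domain
-- ===== SOURCE A (Python) =====
-- def redis_cluster_nodes_group_by_domain(nodes_records: list):
--     domain_latest_nodes = {}
--     for record in nodes_records:
--         immute_domain = record["immute_domain"]
--         update_at = record["update_at"]
--         if immute_domain not in domain_latest_nodes:
--             domain_latest_nodes[immute_domain] = record
--         else:
--             if update_at > domain_latest_nodes[immute_domain]["update_at"]:
--                 domain_latest_nodes[immute_domain] = record
--     return domain_latest_nodes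
-- ===== SOURCE B (Python) =====
-- def redis_cluster_nodes_group_by_domain(nodes_records: list):
--     groups = {}
--     for record in nodes_records:
--         domain = record["immute_domain"]
--         groups[domain] = groups.get(domain, []) + [record]
--     return {domain: max(recs, key=lambda r: r["update_at"]) for domain, recs in groups.items()}
-- ===== Notes on version B (the rewrite author's own statement) =====
-- stated objective: alternative
-- what changed: Replaces A's online keep-the-latest fold (compare-and-overwrite per record) by a two-phase group-by decomposition: one pass collects all records per domain, then a comprehension takes max(recs, key=update_at) per group; max keeps the first maximum, matching A's strict-> keep-first tie rule, and group order is first-appearance order.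
import Mathlib
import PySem

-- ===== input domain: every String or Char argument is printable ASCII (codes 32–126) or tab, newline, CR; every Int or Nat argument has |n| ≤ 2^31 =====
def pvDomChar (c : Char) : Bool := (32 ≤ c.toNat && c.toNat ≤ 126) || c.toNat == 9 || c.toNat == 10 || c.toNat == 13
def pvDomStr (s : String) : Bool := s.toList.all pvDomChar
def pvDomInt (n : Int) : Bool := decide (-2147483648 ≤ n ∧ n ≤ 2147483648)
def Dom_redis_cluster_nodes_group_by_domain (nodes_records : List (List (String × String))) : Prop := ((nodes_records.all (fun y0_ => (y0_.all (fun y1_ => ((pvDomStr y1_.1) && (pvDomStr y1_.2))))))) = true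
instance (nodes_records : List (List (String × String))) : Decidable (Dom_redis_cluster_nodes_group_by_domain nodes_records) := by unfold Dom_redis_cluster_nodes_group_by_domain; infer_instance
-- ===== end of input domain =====

-- B replaces A's single-pass compare-and-overwrite fold by a two-phase group-by decomposition
-- (collect all records per domain, then take the first maximum by update_at per group):
-- an alternative algorithm of the same cost; the return value agrees with A on Pre_ below.

-- ===== PORT A =====
-- record[k] on a dict-as-association-list: first match; Pre_ guarantees the key is present
-- (the Python raises KeyError otherwise), so the "" default is never reached on admitted inputs.
def pvLookup (r : List (String × String)) (k : String) : String :=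
  ((r.find? (fun p => p.1 == k)).map (fun p => p.2)).getD ""

-- the body of A's for-loop; Python's str comparison is code-point lexicographic = Lean's '<'
-- on toList (exact per PYSEM's str-comparison note)
def pvStepA (d : PySem.Dict String (List (String × String))) (record : List (String × String)) :
    PySem.Dict String (List (String × String)) :=
  let immute_domain := pvLookup record "immute_domain"
  let update_at := pvLookup record "update_at"
  if d.contains immute_domain = false then
    d.insert immute_domain record
  else if (pvLookup (d.getD immute_domain []) "update_at").toList < update_at.toList then
    d.insert immute_domain record
  else
    d

def redis_cluster_nodes_group_by_domain (nodes_records : List (List (String × String))) :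
    List (String × List (String × String)) :=
  (nodes_records.foldl pvStepA PySem.Dict.empty).items

-- ===== PORT B =====
-- the key lambda r: r["update_at"], compared as code points (= Python str comparison)
def pvKey (record : List (String × String)) : List Char := (pvLookup record "update_at").toList

-- groups[domain] = groups.get(domain, []) + [record]
def pvStepB (g : PySem.Dict String (List (List (String × String)))) (record : List (String × String)) :
    PySem.Dict String (List (List (String × String))) :=
  g.modify (pvLookup record "immute_domain") [] (fun recs => recs ++ [record])

-- domain ↦ max(recs, key=...) (first maximum; groups are never empty, so the default is unreached)
def pvLatest (p : String × List (List (String × String))) : String × List (String × String) :=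
  (p.1, PySem.List.maxD p.2 pvKey [])

def redis_cluster_nodes_group_by_domain_alt (nodes_records : List (List (String × String))) :
    List (String × List (String × String)) :=
  let groups := nodes_records.foldl pvStepB PySem.Dict.empty
  groups.items.map pvLatest

-- ===== PRECONDITION & SPEC =====
-- Pre_ excludes exactly the inputs with a record missing an "immute_domain" or "update_at" key,
-- on which the Python A raises KeyError (it returns nothing there).
def Pre_redis_cluster_nodes_group_by_domain (nodes_records : List (List (String × String))) : Prop :=
  ∀ r ∈ nodes_records, "immute_domain" ∈ r.map Prod.fst ∧ "update_at" ∈ r.map Prod.fst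
instance (nodes_records : List (List (String × String))) : Decidable (Pre_redis_cluster_nodes_group_by_domain nodes_records) := by unfold Pre_redis_cluster_nodes_group_by_domain; infer_instance

def pvWitness_redis_cluster_nodes_group_by_domain : (List (List (String × String))) :=
  [[("immute_domain", "a.db"), ("update_at", "2024-01-01")],
   [("immute_domain", "a.db"), ("update_at", "2024-02-02")],
   [("immute_domain", "b.db"), ("update_at", "2023-01-01")]]

def Spec_redis_cluster_nodes_group_by_domain (nodes_records : List (List (String × String))) (out : List (String × List (String × String))) : Prop := out = redis_cluster_nodes_group_by_domain_alt nodes_records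
instance (nodes_records : List (List (String × String))) (out : List (String × List (String × String))) : Decidable (Spec_redis_cluster_nodes_group_by_domain nodes_records out) := by unfold Spec_redis_cluster_nodes_group_by_domain; infer_instance

-- ===== CLAIM (what is proved, stated in full; the proofs are below) =====
def Claim_equal_redis_cluster_nodes_group_by_domain : Prop := ∀ (nodes_records : List (List (String × String))), Dom_redis_cluster_nodes_group_by_domain nodes_records → Pre_redis_cluster_nodes_group_by_domain nodes_records → Spec_redis_cluster_nodes_group_by_domain nodes_records (redis_cluster_nodes_group_by_domain nodes_records)

-- ===== LEMMAS AND PROOFS =====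

def pvMStep (acc : Option (List (String × String))) (x : List (String × String)) :
    Option (List (String × String)) :=
  match acc with
  | none => some x
  | some m => if pvKey m < pvKey x then some x else some m

lemma pvMaxD_eq (l : List (List (String × String))) :
    PySem.List.maxD l pvKey [] = (l.foldl pvMStep none).getD [] := by
  unfold PySem.List.maxD PySem.List.max?
  congr 2
  funext a x; cases a <;> rfl

lemma pvMaxD_singleton (r : List (String × String)) :
    PySem.List.maxD [r] pvKey [] = r := by
  rw [pvMaxD_eq]; rfl

lemma pvFoldStep_some (l : List (List (String × String))) :
    ∀ a, ∃ m, l.foldl pvMStep (some a) = some m := by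
  induction l with
  | nil => intro a; exact ⟨a, rfl⟩
  | cons x l ih =>
    intro a
    simp only [List.foldl_cons, pvMStep]
    split <;> exact ih _

lemma pvMaxD_append (x : List (String × String)) (recs : List (List (String × String)))
    (r : List (String × String)) :
    PySem.List.maxD ((x :: recs) ++ [r]) pvKey [] =
      (if pvKey (PySem.List.maxD (x :: recs) pvKey []) < pvKey r then r
       else PySem.List.maxD (x :: recs) pvKey []) := by
  obtain ⟨m, hm⟩ := pvFoldStep_some recs x
  rw [pvMaxD_eq, pvMaxD_eq, List.foldl_append]
  rw [show List.foldl pvMStep none (x :: recs) = List.foldl pvMStep (some x) recs from rfl, hm]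
  simp only [List.foldl_cons, List.foldl_nil, pvMStep, Option.getD_some]
  split <;> rfl
lemma pvEq_of_mem_nodup_fst {β : Type} : ∀ {l : List (String × β)},
    (l.map Prod.fst).Nodup → ∀ {p q : String × β},
    p ∈ l → q ∈ l → p.1 = q.1 → p = q := by
  intro l
  induction l with
  | nil => intro _ p q hp; cases hp
  | cons a l ih =>
    intro h p q hp hq he
    simp only [List.map_cons, List.nodup_cons] at h
    rcases List.mem_cons.mp hp with rfl | hp' <;> rcases List.mem_cons.mp hq with rfl | hq'
    · rfl
    · exact absurd (List.mem_map.mpr ⟨q, hq', he.symm⟩) h.1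
    · exact absurd (List.mem_map.mpr ⟨p, hp', he⟩) h.1
    · exact ih h.2 hp' hq' he

lemma pvContains_map (l : List (String × List (List (String × String)))) (k : String) :
    (PySem.Dict.mk (l.map pvLatest)).contains k = (PySem.Dict.mk l).contains k := by
  simp [PySem.Dict.contains, List.any_map, pvLatest, Function.comp_def]

lemma pvFind?_map (l : List (String × List (List (String × String)))) (k : String) :
    (l.map pvLatest).find? (fun p => p.1 == k) =
      (l.find? (fun p => p.1 == k)).map pvLatest := by
  rw [List.find?_map]
  rfl

lemma pvStep_comm (g : PySem.Dict String (List (List (String × String))))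
    (r : List (String × String))
    (hne : ∀ p ∈ g.items, p.2 ≠ [])
    (hnd : (g.items.map Prod.fst).Nodup) :
    pvStepA (PySem.Dict.mk (g.items.map pvLatest)) r =
      PySem.Dict.mk ((pvStepB g r).items.map pvLatest) := by
  by_cases hc : g.contains (pvLookup r "immute_domain") = true
  · -- domain already present
    obtain ⟨p0, hfind⟩ : ∃ p0, g.items.find? (fun p => p.1 == pvLookup r "immute_domain") = some p0 := by
      rw [← Option.isSome_iff_exists, List.find?_isSome]
      exact List.any_eq_true.mp hc
    have hp0mem : p0 ∈ g.items := List.mem_of_find?_eq_some hfind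
    have hp0dom : p0.1 = pvLookup r "immute_domain" := by
      have := List.find?_some hfind
      simpa using this
    have hgget : g.getD (pvLookup r "immute_domain") [] = p0.2 := by
      simp [PySem.Dict.getD, PySem.Dict.get?, hfind]
    have hmget : (PySem.Dict.mk (g.items.map pvLatest)).getD (pvLookup r "immute_domain") [] =
        PySem.List.maxD p0.2 pvKey [] := by
      simp only [PySem.Dict.getD, PySem.Dict.get?]
      rw [pvFind?_map, hfind]
      rfl
    have hcm : (PySem.Dict.mk (g.items.map pvLatest)).contains (pvLookup r "immute_domain") = true := by
      rw [pvContains_map]; exact hc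
    obtain ⟨x, recs, hrec⟩ : ∃ x recs, p0.2 = x :: recs := by
      cases h2 : p0.2 with
      | nil => exact absurd h2 (hne p0 hp0mem)
      | cons x recs => exact ⟨x, recs, rfl⟩
    have hmax : PySem.List.maxD (p0.2 ++ [r]) pvKey [] =
        (if pvKey (PySem.List.maxD p0.2 pvKey []) < pvKey r then r
         else PySem.List.maxD p0.2 pvKey []) := by
      rw [hrec]; exact pvMaxD_append x recs r
    simp only [pvStepA, pvStepB, PySem.Dict.modify, hmget, hgget, hcm, Bool.true_eq_false,
      if_false]
    have hkey : (pvLookup (PySem.List.maxD p0.2 pvKey []) "update_at").toList =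
        pvKey (PySem.List.maxD p0.2 pvKey []) := rfl
    have hkeyr : (pvLookup r "update_at").toList = pvKey r := rfl
    rw [hkey, hkeyr]
    by_cases hlt : pvKey (PySem.List.maxD p0.2 pvKey []) < pvKey r
    · rw [if_pos hlt]
      simp only [PySem.Dict.insert, hcm, hc, if_true]
      apply congrArg PySem.Dict.mk
      rw [List.map_map, List.map_map]
      apply List.map_congr_left
      intro q hq
      by_cases hq1 : q.1 = pvLookup r "immute_domain"
      · simp only [Function.comp_def, pvLatest, hq1, beq_self_eq_true, if_true, hmax,
          if_pos hlt]
      · simp only [Function.comp_def, pvLatest, beq_iff_eq, hq1, if_false]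
    · rw [if_neg hlt]
      simp only [PySem.Dict.insert, hc, if_true]
      apply congrArg PySem.Dict.mk
      rw [List.map_map]
      refine (List.map_congr_left ?_).symm
      intro q hq
      by_cases hq1 : q.1 = pvLookup r "immute_domain"
      · have hqp0 : q = p0 := pvEq_of_mem_nodup_fst hnd hq hp0mem (hq1.trans hp0dom.symm)
        simp only [Function.comp_def, pvLatest, beq_self_eq_true, if_true, hmax,
          if_neg hlt, hqp0, hp0dom]
      · simp only [Function.comp_def, pvLatest, beq_iff_eq, hq1, if_false]
  · -- new domain: both sides append
    have hc' : g.contains (pvLookup r "immute_domain") = false := by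
      simpa using hc
    have hcm : (PySem.Dict.mk (g.items.map pvLatest)).contains (pvLookup r "immute_domain") = false := by
      rw [pvContains_map]; exact hc'
    have hfind : g.items.find? (fun p => p.1 == pvLookup r "immute_domain") = none := by
      rw [List.find?_eq_none]
      intro p hp hpd
      exact hc (List.any_eq_true.mpr ⟨p, hp, hpd⟩)
    have hget : g.getD (pvLookup r "immute_domain") [] = [] := by
      simp [PySem.Dict.getD, PySem.Dict.get?, hfind]
    simp only [pvStepA, pvStepB, PySem.Dict.modify, PySem.Dict.insert, hget, hcm, hc',
      Bool.false_eq_true, if_true, if_false]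
    simp [pvLatest, pvMaxD_singleton]

lemma pvStepB_ne (g : PySem.Dict String (List (List (String × String))))
    (r : List (String × String))
    (hne : ∀ p ∈ g.items, p.2 ≠ []) :
    ∀ p ∈ (pvStepB g r).items, p.2 ≠ [] := by
  intro p hp
  simp only [pvStepB, PySem.Dict.modify, PySem.Dict.insert] at hp
  split at hp
  · rcases List.mem_map.mp hp with ⟨q, hq, rfl⟩
    split
    · simp
    · exact hne q hq
  · rcases List.mem_append.mp hp with h | h
    · exact hne p h
    · simp only [List.mem_singleton] at h
      subst h
      simp

lemma pvStepB_nodup (g : PySem.Dict String (List (List (String × String))))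
    (r : List (String × String))
    (hnd : (g.items.map Prod.fst).Nodup) :
    ((pvStepB g r).items.map Prod.fst).Nodup := by
  simp only [pvStepB, PySem.Dict.modify, PySem.Dict.insert]
  split
  · rw [List.map_map]
    have : (Prod.fst ∘ fun p => if (p.1 == pvLookup r "immute_domain") = true
        then (pvLookup r "immute_domain", g.getD (pvLookup r "immute_domain") [] ++ [r]) else p)
        = Prod.fst (α := String) (β := List (List (String × String))) := by
      funext q
      by_cases hq : q.1 = pvLookup r "immute_domain" <;> simp [hq]
    rw [this]
    exact hnd
  · rename_i hcont
    rw [List.map_append, List.nodup_append]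
    refine ⟨hnd, by simp, ?_⟩
    intro a ha b hbmem
    have hb' : b = pvLookup r "immute_domain" := by simpa using hbmem
    subst hb'
    intro heq
    subst heq
    rcases List.mem_map.mp ha with ⟨q, hq, hq1⟩
    exact hcont (List.any_eq_true.mpr ⟨q, hq, by simp [hq1]⟩)

lemma pvInv : ∀ (nodes : List (List (String × String)))
    (g : PySem.Dict String (List (List (String × String)))),
    (∀ p ∈ g.items, p.2 ≠ []) → (g.items.map Prod.fst).Nodup →
    List.foldl pvStepA (PySem.Dict.mk (g.items.map pvLatest)) nodes
      = PySem.Dict.mk ((List.foldl pvStepB g nodes).items.map pvLatest) := by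
  intro nodes
  induction nodes with
  | nil => intro g _ _; rfl
  | cons r nodes ih =>
    intro g hne hnd
    simp only [List.foldl_cons]
    rw [pvStep_comm g r hne hnd]
    exact ih (pvStepB g r) (pvStepB_ne g r hne) (pvStepB_nodup g r hnd)

lemma pvFinal (nodes : List (List (String × String))) :
    (nodes.foldl pvStepA PySem.Dict.empty).items
      = ((nodes.foldl pvStepB PySem.Dict.empty).items).map pvLatest := by
  have h := pvInv nodes PySem.Dict.empty (by intro p hp; cases hp) (by simp [PySem.Dict.empty])
  have h0 : (PySem.Dict.mk (((PySem.Dict.empty : PySem.Dict String (List (List (String × String)))).items).map pvLatest))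
      = (PySem.Dict.empty : PySem.Dict String (List (String × String))) := rfl
  rw [h0] at h
  rw [h]

-- ===== VERDICT (by name: the statement is the Claim_ definition above) =====
theorem redis_cluster_nodes_group_by_domain_spec : Claim_equal_redis_cluster_nodes_group_by_domain := by
  intro nodes_records _hDom _hPre
  unfold Spec_redis_cluster_nodes_group_by_domain
  unfold redis_cluster_nodes_group_by_domain redis_cluster_nodes_group_by_domain_alt
  exact pvFinal nodes_records
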